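-- pv_equiv track=rewrite | github.com/thuanvo1302/demo | xstk/lab7/Ex3.py | kiemtra_d
-- ===== SOURCE A (Python) =====
-- def kiemtra_d(A):
--     count_out = 0
--     for i in A:
--         count = 0
--         for j in A:
--             if i[0] == j[0]:
--                 count +=1
--         if count == 4:
--             count_out += 1
--     if count_out == 4:
--         return True
--     return False
-- ===== SOURCE B (Python) =====
-- def kiemtra_d(A):
--     freq = {}
--     for x in A:
--         k = x[0]
--         freq[k] = freq.get(k, 0) + 1
--     groups_of_4 = sum(1 for v in freq.values() if v == 4)
--     return groups_of_4 == 1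
-- ===== Notes on version B (the rewrite author's own statement) =====
-- stated objective: alternative
-- what changed: Replaces the quadratic per-element rescan with a one-pass frequency table of first coordinates followed by a reduction over the table's values: return whether exactly one distinct first coordinate occurs 4 times (count_out==4 iff one size-4 group).
import Mathlib
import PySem

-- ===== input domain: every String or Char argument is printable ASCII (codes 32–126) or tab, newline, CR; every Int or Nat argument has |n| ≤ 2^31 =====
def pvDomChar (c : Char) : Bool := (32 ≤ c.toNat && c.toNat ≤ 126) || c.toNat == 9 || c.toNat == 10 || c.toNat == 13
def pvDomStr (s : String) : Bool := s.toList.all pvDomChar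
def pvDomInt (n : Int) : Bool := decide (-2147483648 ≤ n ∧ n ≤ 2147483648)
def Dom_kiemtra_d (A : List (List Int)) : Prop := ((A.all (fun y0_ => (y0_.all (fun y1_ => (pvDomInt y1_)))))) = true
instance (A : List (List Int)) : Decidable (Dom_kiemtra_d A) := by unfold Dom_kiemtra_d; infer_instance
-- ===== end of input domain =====

-- B replaces A's per-element rescan with a one-pass frequency table of first
-- coordinates, returning whether exactly one distinct first coordinate occurs 4 times.

-- ===== PORT A =====
-- i[0] is PySem.List.pyGetD i 0 0, total form; exact under Pre_ (every row nonempty), where Python returns.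
def kiemtra_d (A : List (List Int)) : Bool :=
  let count_out : Int := A.foldl (fun co i =>
    let count : Int := A.foldl (fun c j =>
      if PySem.List.pyGetD i 0 0 = PySem.List.pyGetD j 0 0 then c + 1 else c) 0
    if count = 4 then co + 1 else co) 0
  if count_out = 4 then true else false

-- ===== PORT B =====
def kiemtra_d_alt (A : List (List Int)) : Bool :=
  let freq : PySem.Dict Int Int := A.foldl (fun d x =>
    let k := PySem.List.pyGetD x 0 0
    d.insert k (d.getD k 0 + 1)) PySem.Dict.empty
  let groups_of_4 : Int := freq.values.foldl (fun s v => if v == 4 then s + 1 else s) 0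
  groups_of_4 == 1

-- ===== PRECONDITION & SPEC =====
-- Python A raises IndexError on i[0] when some row is empty; exactly those inputs are excluded.
def Pre_kiemtra_d (A : List (List Int)) : Prop := ∀ l ∈ A, l ≠ []
instance (A : List (List Int)) : Decidable (Pre_kiemtra_d A) := by unfold Pre_kiemtra_d; infer_instance
def pvWitness_kiemtra_d : List (List Int) := [[1, 2], [1], [2], [1, 0], [1]]
def Spec_kiemtra_d (A : List (List Int)) (out : Bool) : Prop := out = kiemtra_d_alt A
instance (A : List (List Int)) (out : Bool) : Decidable (Spec_kiemtra_d A out) := by unfold Spec_kiemtra_d; infer_instance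

-- ===== CLAIM (what is proved, stated in full; the proofs are below) =====
def Claim_equal_kiemtra_d : Prop := ∀ (A : List (List Int)), Dom_kiemtra_d A → Pre_kiemtra_d A → Spec_kiemtra_d A (kiemtra_d A)

-- ===== LEMMAS AND PROOFS =====

-- the list of first coordinates
def pvHeads (A : List (List Int)) : List Int := A.map (fun x => PySem.List.pyGetD x 0 0)

def pvP (L : List Int) : Int → Bool := fun h => L.count h == 4

-- A's inner loop counts occurrences of i's first coordinate among all first coordinates
lemma inner_count (A : List (List Int)) (k : Int) (init : Int) :
    A.foldl (fun c j => if k = PySem.List.pyGetD j 0 0 then c + 1 else c) init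
      = init + ((pvHeads A).count k : Int) := by
  induction A generalizing init with
  | nil => simp [pvHeads]
  | cons x xs ih =>
      simp only [List.foldl_cons, pvHeads, List.map_cons, List.count_cons]
      rw [ih]
      by_cases h : k = PySem.List.pyGetD x 0 0
      · simp [pvHeads, h]; ring
      · simp [pvHeads, h, Ne.symm h]

-- A's outer loop counts the rows whose first coordinate has multiplicity 4 in `full`
lemma outer_count (A full : List (List Int)) (init : Int) :
    A.foldl (fun co i =>
      if (full.foldl (fun c j =>
            if PySem.List.pyGetD i 0 0 = PySem.List.pyGetD j 0 0 then c + 1 else c) 0 : Int) = 4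
      then co + 1 else co) init
      = init + ((pvHeads A).countP (pvP (pvHeads full)) : Int) := by
  induction A generalizing init with
  | nil => simp [pvHeads]
  | cons x xs ih =>
      simp only [List.foldl_cons, pvHeads, List.map_cons, List.countP_cons]
      rw [inner_count, ih]
      simp only [pvP, beq_iff_eq, pvHeads]
      push_cast
      split_ifs <;> omega

-- generic fold-count for B's reduction over the table's values
lemma values_count (l : List Int) (init : Int) :
    l.foldl (fun s v => if v == 4 then s + 1 else s) init
      = init + (l.countP (fun v => v == 4) : Int) := by
  induction l generalizing init with
  | nil => simp
  | cons x xs ih =>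
      simp only [List.foldl_cons, List.countP_cons]
      rw [ih]
      by_cases h : x = (4 : Int)
      · simp [h]; ring
      · simp [h]

-- key counting identity: rows with multiplicity-4 first coordinate come in groups of 4
lemma countP_eq_four_mul (L : List Int) :
    L.countP (pvP L) = 4 * (PySem.List.dedup L).countP (pvP L) := by
  have hperm : ((L.filter (pvP L)).dedup).Perm ((PySem.List.dedup L).filter (pvP L)) := by
    rw [List.perm_ext_iff_of_nodup (List.nodup_dedup _)
        ((PySem.List.nodup_dedup L).filter _)]
    intro a
    simp [List.mem_dedup, List.mem_filter, and_comm]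
  calc L.countP (pvP L)
      = (L.filter (pvP L)).length := by rw [List.countP_eq_length_filter]
    _ = ((L.filter (pvP L)).dedup.map (fun x => (L.filter (pvP L)).count x)).sum :=
        (List.sum_map_count_dedup_eq_length _).symm
    _ = (((PySem.List.dedup L).filter (pvP L)).map (fun x => (L.filter (pvP L)).count x)).sum :=
        (hperm.map _).sum_eq
    _ = (((PySem.List.dedup L).filter (pvP L)).map (fun _ => 4)).sum := by
        apply congrArg
        apply List.map_congr_left
        intro a ha
        have hp : pvP L a = true := (List.mem_filter.mp ha).2
        rw [List.count_filter hp]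
        simpa [pvP] using hp
    _ = 4 * ((PySem.List.dedup L).filter (pvP L)).length := by
        rw [List.map_const', List.sum_replicate, smul_eq_mul, Nat.mul_comm]
    _ = 4 * (PySem.List.dedup L).countP (pvP L) := by rw [List.countP_eq_length_filter]

-- B's frequency table is the counter of the first coordinates
lemma freq_eq_counter (A : List (List Int)) :
    A.foldl (fun d x =>
      let k := PySem.List.pyGetD x 0 0
      d.insert k (d.getD k 0 + 1)) PySem.Dict.empty
      = PySem.Dict.counter (pvHeads A) := by
  rw [← PySem.Dict.foldl_insert_getD_add_one_eq_counter, pvHeads, List.foldl_map]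

lemma A_eval (A : List (List Int)) :
    kiemtra_d A
      = (if ((0:Int) + ((pvHeads A).countP (pvP (pvHeads A)) : Int)) = 4 then true else false) := by
  unfold kiemtra_d
  rw [outer_count A A 0]

lemma B_eval (A : List (List Int)) :
    kiemtra_d_alt A
      = (((PySem.Dict.counter (pvHeads A)).values.foldl
            (fun s v => if v == 4 then s + 1 else s) (0:Int)) == 1) := by
  unfold kiemtra_d_alt
  rw [freq_eq_counter A]

theorem kiemtra_d_spec : Claim_equal_kiemtra_d := by
  intro A _ _
  unfold Spec_kiemtra_d
  rw [A_eval, B_eval]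
  have hvals : (PySem.Dict.counter (pvHeads A)).values
      = (PySem.Set.ofList (pvHeads A)).map (fun k => ((pvHeads A).count k : Int)) := by
    have := PySem.Dict.items_counter (xs := pvHeads A)
    simp only [PySem.Dict.values, this, List.map_map]
    rfl
  rw [hvals, values_count]
  have hcp : ((PySem.Set.ofList (pvHeads A)).map (fun k => ((pvHeads A).count k : Int))).countP
        (fun v => v == 4)
      = (PySem.Set.ofList (pvHeads A)).countP (pvP (pvHeads A)) := by
    rw [List.countP_map]
    apply List.countP_congr
    intro a _
    simp [Function.comp, pvP]
    omega
  rw [hcp]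
  have hkey := countP_eq_four_mul (pvHeads A)
  rw [PySem.List.dedup_eq_ofList] at hkey
  by_cases hg : (PySem.Set.ofList (pvHeads A)).countP (pvP (pvHeads A)) = 1
  · simp [hg, hkey]
  · have h1 : ¬ ((0 : Int) + ((pvHeads A).countP (pvP (pvHeads A)) : Int) = 4) := by
      rw [hkey]; push_cast; omega
    have h2 : ((0 : Int) + (((PySem.Set.ofList (pvHeads A)).countP (pvP (pvHeads A)) : Nat) : Int)) ≠ 1 := by
      omega
    have h1' : (((pvHeads A).countP (pvP (pvHeads A)) : Nat) : Int) ≠ 4 := by omega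
    have h2' : (((PySem.Set.ofList (pvHeads A)).countP (pvP (pvHeads A)) : Nat) : Int) ≠ 1 := by omega
    simp [h1', h2']
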